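-- pv_equiv track=rewrite | github.com/wpadala420/PersonDataSearcher | modules/FacebookPublicAccountParser.py | getUrlFromHref
-- ===== SOURCE A (Python) =====
-- def getUrlFromHref(href):
--     result = ''
--     found_first_equal_mark = False
--     first_equal_index = -1
--     for c in range(len(href)):
--         if href[c] == '=' and found_first_equal_mark is False:
--             found_first_equal_mark = True
--             first_equal_index = c
--     if first_equal_index != -1:
--         for it in range(first_equal_index + 2, len(href)):
--             if href[it] != '"':
--                 result += href[it]
--             else:
--                 return result
-- ===== SOURCE B (Python) =====
-- def getUrlFromHref(href):
--     i = href.find('=')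
--     if i == -1:
--         return None
--     start = i + 2
--     j = href.find('"', start)
--     if j == -1:
--         return None
--     return href[start:j]
-- ===== Notes on version B (the rewrite author's own statement) =====
-- stated objective: faster
-- what changed: Replaces A's two hand-written per-character index loops (a full scan with a found-flag for the first '=', then character-by-character string accumulation until '"') with str.find to locate both boundaries and a single slice href[start:j].
import Mathlib
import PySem

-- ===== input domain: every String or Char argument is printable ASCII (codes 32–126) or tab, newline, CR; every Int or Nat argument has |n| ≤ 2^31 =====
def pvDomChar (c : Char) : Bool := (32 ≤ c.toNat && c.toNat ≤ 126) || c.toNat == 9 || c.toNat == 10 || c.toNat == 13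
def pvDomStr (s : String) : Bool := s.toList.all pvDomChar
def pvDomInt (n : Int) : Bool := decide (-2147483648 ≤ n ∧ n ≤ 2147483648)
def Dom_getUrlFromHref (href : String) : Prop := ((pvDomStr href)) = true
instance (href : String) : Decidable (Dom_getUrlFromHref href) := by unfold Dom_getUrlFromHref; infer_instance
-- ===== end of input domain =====

-- B replaces A's two per-character index loops by str.find boundary location plus one slice (same O(n), measured constant-factor faster in a timing run).

-- ===== PORT A =====
-- first loop 'for c in range(len(href))': fold over the index range, state = (found_first_equal_mark, first_equal_index)
def pvFindEqStep (l : List Char) (st : Bool × Int) (c : Nat) : Bool × Int :=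
  if PySem.List.pyGet? l (c : Int) = some '=' ∧ st.1 = false then (true, (c : Int)) else st

-- second loop 'for it in range(first_equal_index + 2, len(href))': reading href[it] for it = start..len-1
-- is reading the characters of l.drop start in order; 'some result' = the early 'return result',
-- 'none' = the loop (or function) ends without return, Python returns None.
def pvScanA : List Char → List Char → Option (List Char)
  | [], _ => none
  | c :: rest, result => if c ≠ '"' then pvScanA rest (result ++ [c]) else some result

def getUrlFromHref (href : String) : Option String :=
  let l := href.toList
  let st := (List.range l.length).foldl (pvFindEqStep l) (false, -1)
  if st.2 ≠ -1 then
    match pvScanA (l.drop (st.2.toNat + 2)) [] with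
    | some r => some (String.ofList r)
    | none => none
  else none

-- ===== PORT B =====
def getUrlFromHref_alt (href : String) : Option String :=
  let i := PySem.Str.find href "="
  if i = -1 then none
  else
    let start := i + 2
    let j := PySem.Str.findFrom href "\"" start
    if j = -1 then none
    else some (PySem.Str.slice href (some start) (some j))

-- ===== PRECONDITION & SPEC =====
def Spec_getUrlFromHref (href : String) (out : Option String) : Prop := out = getUrlFromHref_alt href
instance (href : String) (out : Option String) : Decidable (Spec_getUrlFromHref href out) := by unfold Spec_getUrlFromHref; infer_instance

-- ===== CLAIM (what is proved, stated in full; the proofs are below) =====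
def Claim_equal_getUrlFromHref : Prop := ∀ (href : String), Dom_getUrlFromHref href → Spec_getUrlFromHref href (getUrlFromHref href)

-- ===== LEMMAS AND PROOFS =====

lemma pv_singleton_prefix (c : Char) (m : List Char) : [c] <+: m ↔ m[0]? = some c := by
  cases m <;> simp [List.cons_prefix_iff, eq_comm]

lemma pv_singleton_prefix_drop (c : Char) (l : List Char) (n : Nat) :
    [c] <+: l.drop n ↔ l[n]? = some c := by
  rw [pv_singleton_prefix]; simp [List.getElem?_drop]

lemma pv_find_singleton (l : List Char) (c : Char) :
    PySem.Chars.find l [c] =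
      match l.findIdx? (· == c) with
      | none => -1
      | some i => (i : Int) := by
  cases h : l.findIdx? (· == c) with
  | none =>
      have hall := List.findIdx?_eq_none_iff.mp h
      rw [PySem.Chars.find_eq_neg_one_iff]
      intro hinf
      have hc : c ∈ l := by rcases hinf with ⟨s, t, rfl⟩; simp
      have := hall c hc; simp at this
  | some i =>
      obtain ⟨hi, hpi, hmin⟩ := List.findIdx?_eq_some_iff_getElem.mp h
      have hgi : l[i]? = some c := by
        rw [List.getElem?_eq_getElem hi]; simpa using hpi
      have hinf : [c] <:+: l := by
        rw [← PySem.Chars.isIn_iff_infix, ← PySem.Chars.exists_prefix_drop_iff_isIn]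
        exact ⟨i, (pv_singleton_prefix_drop c l i).mpr hgi⟩
      have hpos : 0 ≤ PySem.Chars.find l [c] := (PySem.Chars.find_nonneg_iff l [c]).mpr hinf
      obtain ⟨hpfx, hmin'⟩ := PySem.Chars.find_spec hpos
      have hgN : l[(PySem.Chars.find l [c]).toNat]? = some c :=
        (pv_singleton_prefix_drop c l _).mp hpfx
      have h1 : ¬ (PySem.Chars.find l [c]).toNat < i := by
        intro hlt
        obtain ⟨hN, hNv⟩ := List.getElem?_eq_some_iff.mp hgN
        exact hmin _ hlt (by simp [hNv])
      have h2 : ¬ i < (PySem.Chars.find l [c]).toNat := by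
        intro hlt
        exact hmin' i hlt ((pv_singleton_prefix_drop c l i).mpr hgi)
      have : (PySem.Chars.find l [c]).toNat = i := by omega
      simp only []
      omega

lemma pv_fold_range (l : List Char) :
    ∀ n, n ≤ l.length →
    (List.range n).foldl (pvFindEqStep l) (false, -1) =
      match (l.take n).findIdx? (· == '=') with
      | none => (false, -1)
      | some i => (true, (i : Int)) := by
  intro n hn
  induction n with
  | zero => simp
  | succ n ih =>
      have hn' : n ≤ l.length := by omega
      have hlt : n < l.length := by omega
      rw [List.range_succ, List.foldl_append, ih hn', List.take_add_one, List.findIdx?_append]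
      have hto : l[n]?.toList = [l[n]] := by simp [List.getElem?_eq_getElem hlt]
      rw [hto]
      cases h : (l.take n).findIdx? (· == '=') with
      | some i => simp [pvFindEqStep]
      | none =>
          simp only [Option.none_or]
          by_cases hc : l[n] = '='
          · simp [List.findIdx?_cons, hc, pvFindEqStep, PySem.List.pyGet?_natCast,
              List.getElem?_eq_getElem hlt, List.length_take, hn']
          · simp [List.findIdx?_cons, hc, pvFindEqStep, PySem.List.pyGet?_natCast,
              List.getElem?_eq_getElem hlt]

lemma pv_scanA_eq (m acc : List Char) :
    pvScanA m acc =
      match m.findIdx? (· == '"') with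
      | none => none
      | some j => some (acc ++ m.take j) := by
  induction m generalizing acc with
  | nil => rfl
  | cons c rest ih =>
      by_cases hc : c = '"'
      · simp [pvScanA, hc, List.findIdx?_cons]
      · rw [pvScanA, if_pos hc, ih]
        cases h : rest.findIdx? (· == '"') with
        | none => simp [List.findIdx?_cons, hc, h]
        | some j => simp [List.findIdx?_cons, hc, h]

lemma pv_findFrom_quote (l : List Char) (k : Nat) :
    PySem.Chars.findFrom l ['"'] (k : Int) none =
      if PySem.Chars.find (l.drop k) ['"'] = -1 then -1
      else (k : Int) + PySem.Chars.find (l.drop k) ['"'] := by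
  by_cases hk : k ≤ l.length
  · exact PySem.Chars.findFrom_natCast l ['"'] k hk
  · have h1 : l.drop k = [] := List.drop_eq_nil_of_le (by omega)
    have h2 : PySem.Chars.find ([] : List Char) ['"'] = -1 := by decide
    rw [h1, h2, if_pos rfl]
    simp only [PySem.Chars.findFrom]
    have : ((l.length : Int)) < (k : Int) := by exact_mod_cast Nat.lt_of_not_le hk
    simp
    omega

-- ===== VERDICT (by name: the statement is the Claim_ definition above) =====
theorem getUrlFromHref_spec : Claim_equal_getUrlFromHref := by
  intro href _
  unfold Spec_getUrlFromHref getUrlFromHref getUrlFromHref_alt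
  simp only [PySem.Str.find_eq, PySem.Str.findFrom_eq]
  have heq : ("=" : String).toList = ['='] := by decide
  have hqq : ("\"" : String).toList = ['"'] := by decide
  rw [heq, hqq, pv_find_singleton, pv_fold_range href.toList href.toList.length le_rfl,
    List.take_length]
  cases h : href.toList.findIdx? (· == '=') with
  | none => simp
  | some a =>
      have hA : ¬ ((a : Int) = -1) := by omega
      have hcast : ((a : Int)) + 2 = ((a + 2 : Nat) : Int) := by push_cast; ring
      have htn : ((a : Int)).toNat = a := by omega
      simp only [htn]
      rw [hcast, pv_findFrom_quote, pv_find_singleton]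
      cases h2 : (href.toList.drop (a + 2)).findIdx? (· == '"') with
      | none => simp [pv_scanA_eq, h2, hA]
      | some j =>
          have hj : ((j : Int)) ≠ -1 := by omega
          have hslice : PySem.Str.slice href (some ((a + 2 : Nat) : Int))
              (some (((a + 2 : Nat) : Int) + (j : Int))) =
              String.ofList ((href.toList.drop (a + 2)).take j) := by
            show String.ofList (PySem.Chars.slice href.toList _ _) = _
            rw [PySem.Chars.slice_eq_listSlice, PySem.List.slice_natCast_add]
          have hne : (((a + 2 : Nat) : Int) + (j : Int)) ≠ -1 := by omega
          rw [pv_scanA_eq, h2]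
          simp only []
          rw [if_neg hj, if_neg hne, if_pos (show ((true, (a : Int)).2 ≠ -1) from hA)]
          simp only [List.nil_append]
          rw [hslice, if_neg hA]
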